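-- pv_equiv track=rewrite | github.com/shaniceng/cs4211-project | away_v2.py | process_sequence_to_formatted_array
-- ===== SOURCE A (Python) =====
-- def process_sequence_to_formatted_array(sequence_array):
--     pos_array = [-1, -1, -1, -1, -1, -1, 0, 0, 0, 0, 0, 0, 0, -1, -1, -1, -1, -1, -1]
--
--     for item in sequence_array:
--         if item == "L":
--             pos_array[6] = 1
--         elif item == "LR":
--             pos_array[7] = 1
--         elif item == "CL":
--             pos_array[8] = 1
--         elif item == "C":
--             pos_array[9] = 1
--         elif item == "CR":
--             pos_array[10] = 1
--         elif item == "RL":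
--             pos_array[11] = 1
--         elif item == "R":
--             pos_array[12] = 1
--
--     return pos_array
-- ===== SOURCE B (Python) =====
-- _TOKEN_SLOTS = [("L", 6), ("LR", 7), ("CL", 8), ("C", 9), ("CR", 10), ("RL", 11), ("R", 12)]
--
-- def process_sequence_to_formatted_array(sequence_array):
--     pos_array = [-1, -1, -1, -1, -1, -1, 0, 0, 0, 0, 0, 0, 0, -1, -1, -1, -1, -1, -1]
--     for token, i in _TOKEN_SLOTS:
--         if token in sequence_array:
--             pos_array[i] = 1
--     return pos_array
-- ===== Notes on version B (the rewrite author's own statement) =====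
-- stated objective: alternative
-- what changed: B drives the loop over the fixed token->slot table and sets each slot by a membership test in the sequence, instead of scanning the sequence and dispatching through a 7-way if/elif chain.
import Mathlib
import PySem

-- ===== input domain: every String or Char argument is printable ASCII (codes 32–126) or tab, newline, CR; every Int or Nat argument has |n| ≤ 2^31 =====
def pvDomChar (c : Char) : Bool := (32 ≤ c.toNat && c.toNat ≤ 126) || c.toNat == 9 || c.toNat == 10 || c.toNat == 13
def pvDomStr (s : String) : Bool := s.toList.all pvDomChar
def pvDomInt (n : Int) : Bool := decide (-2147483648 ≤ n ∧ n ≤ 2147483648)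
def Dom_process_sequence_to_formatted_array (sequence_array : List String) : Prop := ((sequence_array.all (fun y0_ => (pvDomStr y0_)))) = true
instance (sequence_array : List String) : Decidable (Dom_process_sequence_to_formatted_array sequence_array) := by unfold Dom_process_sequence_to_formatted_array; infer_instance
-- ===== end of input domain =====

-- ===== PORT A =====
-- header: B loops over the fixed token->slot table with a membership test instead of scanning the sequence through an if/elif chain (alternative decomposition).
def process_sequence_to_formatted_array (sequence_array : List String) : List Int :=
  sequence_array.foldl (fun pos_array item =>
    if item = "L" then pos_array.set 6 1
    else if item = "LR" then pos_array.set 7 1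
    else if item = "CL" then pos_array.set 8 1
    else if item = "C" then pos_array.set 9 1
    else if item = "CR" then pos_array.set 10 1
    else if item = "RL" then pos_array.set 11 1
    else if item = "R" then pos_array.set 12 1
    else pos_array)
    [-1, -1, -1, -1, -1, -1, 0, 0, 0, 0, 0, 0, 0, -1, -1, -1, -1, -1, -1]

-- ===== PORT B =====
def pvTokenSlots : List (String × Nat) :=
  [("L", 6), ("LR", 7), ("CL", 8), ("C", 9), ("CR", 10), ("RL", 11), ("R", 12)]

def process_sequence_to_formatted_array_alt (sequence_array : List String) : List Int :=
  pvTokenSlots.foldl (fun pos_array ti =>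
    if sequence_array.contains ti.1 then pos_array.set ti.2 1 else pos_array)
    [-1, -1, -1, -1, -1, -1, 0, 0, 0, 0, 0, 0, 0, -1, -1, -1, -1, -1, -1]

-- ===== PRECONDITION & SPEC =====
def Spec_process_sequence_to_formatted_array (sequence_array : List String) (out : List Int) : Prop := out = process_sequence_to_formatted_array_alt sequence_array
instance (sequence_array : List String) (out : List Int) : Decidable (Spec_process_sequence_to_formatted_array sequence_array out) := by unfold Spec_process_sequence_to_formatted_array; infer_instance

-- ===== CLAIM (what is proved, stated in full; the proofs are below) =====
def Claim_equal_process_sequence_to_formatted_array : Prop := ∀ (sequence_array : List String), Dom_process_sequence_to_formatted_array sequence_array → Spec_process_sequence_to_formatted_array sequence_array (process_sequence_to_formatted_array sequence_array)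

-- ===== LEMMAS AND PROOFS =====

-- ===== VERDICT (by name: the statement is the Claim_ definition above) =====
-- characterisation: both sides equal this list of membership flags
def pvTarget (xs : List String) : List Int :=
  [-1, -1, -1, -1, -1, -1,
   (if xs.contains "L" then 1 else 0), (if xs.contains "LR" then 1 else 0),
   (if xs.contains "CL" then 1 else 0), (if xs.contains "C" then 1 else 0),
   (if xs.contains "CR" then 1 else 0), (if xs.contains "RL" then 1 else 0),
   (if xs.contains "R" then 1 else 0),
   -1, -1, -1, -1, -1, -1]

lemma altEqTarget (xs : List String) :
    process_sequence_to_formatted_array_alt xs = pvTarget xs := by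
  unfold process_sequence_to_formatted_array_alt pvTokenSlots pvTarget
  by_cases h1 : "L" ∈ xs <;> by_cases h2 : "LR" ∈ xs <;>
  by_cases h3 : "CL" ∈ xs <;> by_cases h4 : "C" ∈ xs <;>
  by_cases h5 : "CR" ∈ xs <;> by_cases h6 : "RL" ∈ xs <;>
  by_cases h7 : "R" ∈ xs <;>
  simp [h1, h2, h3, h4, h5, h6, h7, List.set]

lemma aGen (xs : List String) (a b c d e f g : Int) :
    xs.foldl (fun pos_array item =>
      if item = "L" then pos_array.set 6 1
      else if item = "LR" then pos_array.set 7 1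
      else if item = "CL" then pos_array.set 8 1
      else if item = "C" then pos_array.set 9 1
      else if item = "CR" then pos_array.set 10 1
      else if item = "RL" then pos_array.set 11 1
      else if item = "R" then pos_array.set 12 1
      else pos_array)
      [-1, -1, -1, -1, -1, -1, a, b, c, d, e, f, g, -1, -1, -1, -1, -1, -1] =
    [-1, -1, -1, -1, -1, -1,
     (if xs.contains "L" then 1 else a), (if xs.contains "LR" then 1 else b),
     (if xs.contains "CL" then 1 else c), (if xs.contains "C" then 1 else d),
     (if xs.contains "CR" then 1 else e), (if xs.contains "RL" then 1 else f),
     (if xs.contains "R" then 1 else g),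
     -1, -1, -1, -1, -1, -1] := by
  induction xs generalizing a b c d e f g with
  | nil => simp
  | cons x xs ih =>
    by_cases h1 : x = "L"
    · simp [List.foldl_cons, h1, List.set, ih]
    · by_cases h2 : x = "LR"
      · simp [List.foldl_cons, h2, List.set, ih]
      · by_cases h3 : x = "CL"
        · simp [List.foldl_cons, h3, List.set, ih]
        · by_cases h4 : x = "C"
          · simp [List.foldl_cons, h4, List.set, ih]
          · by_cases h5 : x = "CR"
            · simp [List.foldl_cons, h5, List.set, ih]
            · by_cases h6 : x = "RL"
              · simp [List.foldl_cons, h6, List.set, ih]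
              · by_cases h7 : x = "R"
                · simp [List.foldl_cons, h7, List.set, ih]
                · simp [List.foldl_cons, h1, h2, h3, h4, h5, h6, h7, ih,
                        Ne.symm h1, Ne.symm h2, Ne.symm h3, Ne.symm h4,
                        Ne.symm h5, Ne.symm h6, Ne.symm h7]

lemma aEqTarget (xs : List String) :
    process_sequence_to_formatted_array xs = pvTarget xs := by
  unfold process_sequence_to_formatted_array pvTarget
  rw [aGen]

-- ===== VERDICT (by name: the statement is the Claim_ definition above) =====
theorem process_sequence_to_formatted_array_spec : Claim_equal_process_sequence_to_formatted_array := by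
  intro xs _
  unfold Spec_process_sequence_to_formatted_array
  rw [aEqTarget, altEqTarget]
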